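-- pv_equiv track=rewrite | github.com/aliwo/swblog | _drafts/kakao_blind_2019/mooji_live.py | solution
-- ===== SOURCE A (Python) =====
-- from collections import Counter
--
-- def find_left_food(food_times, start, last_key):
--     '''
--     남은 음식이 존재할 때만 호출해야 합니다.
--     '''
--     while True:
--         if food_times[start] > last_key:
--             break
--         start += 1
--     return start
--
-- def solution(food_times, k):
--     '''
--     k 는 방송이 터지기 까지 남은 시간...
--     리스트를 계속 회전하는 대신, counter 를 만들어서 회전하면 훨씬 빠르다.
--     '''
--     food_left = len(food_times)
--     counter = Counter(food_times)
--     last_key = 0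
--
--     for key in sorted(counter.keys()):
--         # k 가 음수가 되는 경우는 말이 안되는 건가?
--         k -= food_left * (key - last_key)
--         food_left -= counter[key]
--         last_key = key
--         if food_left <= 0: # 방송이 끊기기도 전에 다 먹은 경우
--             return -1
--         if k < food_left:
--             # 남아있는 음식을 세서 다음 먹어야 할 음식을 리턴
--             i = 0 # 먹은 음식 수
--             j = find_left_food(food_times, 0, last_key) # 다음 번 먹어야 할 음식의 인덱스
--             while i < k:
--                 i += 1
--                 j = find_left_food(food_times, j+1, last_key)
--             return j + 1
-- ===== SOURCE B (Python) =====
-- def _first(lo, hi, pred):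
--     """Smallest i in [lo, hi) with pred(i) (pred assumed monotone), or hi if none."""
--     while lo < hi:
--         mid = (lo + hi) // 2
--         if pred(mid):
--             hi = mid
--         else:
--             lo = mid + 1
--     return lo
--
--
-- def solution(food_times, k):
--     """Prefix sums over the sorted times + binary search for the moment the
--     broadcast interrupts; one final scan picks the food to eat next."""
--     n = len(food_times)
--     ts = sorted(food_times)
--     prefix = [0]
--     s = 0
--     for t in ts:
--         s += t
--         prefix.append(s)
--     vals = sorted(set(food_times))
--     m = len(vals)
--
--     def spent(v):
--         # total seconds eaten by the time every food with time <= v is finished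
--         r = _first(0, n, lambda i: ts[i] > v)   # foods with time <= v
--         return prefix[r] + v * (n - r), n - r   # (time spent, foods still left)
--
--     def interrupted(j):
--         s, left = spent(vals[j])
--         return k - s < left
--
--     j = _first(0, m - 1, interrupted)
--     if j >= m - 1:
--         return -1                                # eating ends before the broadcast cuts
--     s, _ = spent(vals[j])
--     r = k - s
--     if r < 0:
--         r = 0
--     seen = 0
--     for i, t in enumerate(food_times):
--         if t > vals[j]:
--             if seen == r:
--                 return i + 1
--             seen += 1
-- ===== Notes on version B (the rewrite author's own statement) =====
-- stated objective: alternative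
-- what changed: B replaces A's linear sweep over the sorted distinct times (with running k/food_left state and repeated find_left_food rescans) by closed-form statistics from one prefix-sum array over the sorted times, a binary search for the first distinct value at which the broadcast interrupts, and a single enumerate pass that picks the answer.
-- outside the precondition, e.g. on solution([], 5): A returns None, B returns -1
import Mathlib
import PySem

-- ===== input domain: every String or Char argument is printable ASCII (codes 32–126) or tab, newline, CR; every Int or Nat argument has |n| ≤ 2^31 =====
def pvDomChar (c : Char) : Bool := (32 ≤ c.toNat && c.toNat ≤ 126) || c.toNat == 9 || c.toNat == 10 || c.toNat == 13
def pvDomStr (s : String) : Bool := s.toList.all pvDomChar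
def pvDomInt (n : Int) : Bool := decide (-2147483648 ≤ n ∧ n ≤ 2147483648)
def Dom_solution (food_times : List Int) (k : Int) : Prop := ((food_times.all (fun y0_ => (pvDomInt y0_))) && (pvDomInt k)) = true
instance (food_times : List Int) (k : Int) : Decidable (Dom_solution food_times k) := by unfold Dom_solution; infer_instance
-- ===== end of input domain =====

-- B replaces A's stateful sweep over the sorted distinct times (running k/food_left plus
-- repeated find_left_food rescans) by closed-form statistics from a prefix-sum array over the
-- sorted times, a binary search for the first interrupting value, and one selection pass
-- (objective: alternative, same asymptotic cost).

-- ===== PORT A =====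
-- find_left_food's 'while True' scan, with enough fuel to reach any index of the list;
-- the 'none' arm is where Python would raise IndexError (never reached where A returns).
def flfAux (food_times : List Int) (last_key : Int) : Nat → Int → Int
  | 0, start => start
  | fuel+1, start =>
    match PySem.List.pyGet? food_times start with
    | some v => if v > last_key then start else flfAux food_times last_key fuel (start + 1)
    | none => start

def find_left_food (food_times : List Int) (start last_key : Int) : Int :=
  flfAux food_times last_key (food_times.length + 1) start

-- 'i = 0; while i < k: i += 1; j = find_left_food(j+1)' runs max(k,0) = k.toNat times
def eatLoop (food_times : List Int) (last_key : Int) : Nat → Int → Int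
  | 0, j => j
  | i+1, j => eatLoop food_times last_key i (find_left_food food_times (j + 1) last_key)

-- the 'for key in sorted(counter.keys())' loop; [] = Python falls off the loop and returns None (excluded by Pre_)
def solLoop (food_times : List Int) (counter : PySem.Dict Int Int) :
    List Int → Int → Int → Int → Int
  | [], _, _, _ => 0
  | key :: keys, k, food_left, last_key =>
    let k' := k - food_left * (key - last_key)
    let food_left' := food_left - counter.getD key 0
    if food_left' ≤ 0 then -1
    else if k' < food_left' then
      eatLoop food_times key k'.toNat (find_left_food food_times 0 key) + 1
    else solLoop food_times counter keys k' food_left' key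

def solution (food_times : List Int) (k : Int) : Int :=
  let counter := PySem.Dict.counter food_times
  solLoop food_times counter
    (PySem.List.sorted counter.keys (fun x => x) false) k (food_times.length : Int) 0

-- ===== PORT B =====
-- Source B's hand-written `_first(lo, hi, pred)` binary search; the Python while loop is
-- totalized with fuel ≥ hi - lo (the interval shrinks each iteration).
def bfirst (pred : Int → Bool) : Nat → Int → Int → Int
  | 0, lo, _ => lo
  | fuel+1, lo, hi =>
    if lo < hi then
      let mid := PySem.Int.floordiv (lo + hi) 2
      if pred mid then bfirst pred fuel lo mid else bfirst pred fuel (mid + 1) hi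
    else lo

-- Source B's `for i, t in enumerate(food_times)` selection loop; the [] arm is Python's
-- fall-off-the-loop None, unreachable on Pre_.
def pickScan (v r : Int) : List (Int × Int) → Int → Int
  | [], _ => 0
  | (i, t) :: rest, seen =>
    if t > v then (if seen = r then i + 1 else pickScan v r rest (seen + 1))
    else pickScan v r rest seen

-- Source B's `spent(v)`: ts[i] and prefix[r] are always indexed in range (0 ≤ i < n,
-- 0 ≤ r ≤ n), so the pyGetD default 0 is never consulted.
def spentLeft (ts prefixL : List Int) (n v : Int) (fuel : Nat) : Int × Int :=
  let r := bfirst (fun i => decide (v < PySem.List.pyGetD ts i 0)) fuel 0 n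
  (PySem.List.pyGetD prefixL r 0 + v * (n - r), n - r)

def solution_alt (food_times : List Int) (k : Int) : Int :=
  let n : Int := (food_times.length : Int)
  let ts := PySem.List.sorted food_times (fun x => x) false
  let prefixL := (ts.foldl (fun (acc : List Int × Int) t => (acc.1 ++ [acc.2 + t], acc.2 + t))
      ([0], 0)).1
  let vals := PySem.List.sorted (PySem.Set.ofList food_times) (fun x => x) false
  let m : Int := (vals.length : Int)
  let j := bfirst (fun j =>
      let v := PySem.List.pyGetD vals j 0
      decide (k - (spentLeft ts prefixL n v food_times.length).1
        < (spentLeft ts prefixL n v food_times.length).2))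
    vals.length 0 (m - 1)
  if m - 1 ≤ j then -1
  else
    let v := PySem.List.pyGetD vals j 0
    let rem := k - (spentLeft ts prefixL n v food_times.length).1
    let rem := if rem < 0 then 0 else rem
    pickScan v rem (PySem.List.enumerate food_times 0) 0

-- ===== PRECONDITION & SPEC =====
-- Pre_ excludes only the empty list, on which A falls off its for-loop and returns None (not an int).
def Pre_solution (food_times : List Int) (k : Int) : Prop := food_times ≠ []
instance (food_times : List Int) (k : Int) : Decidable (Pre_solution food_times k) := by
  unfold Pre_solution; infer_instance

def pvWitness_solution : List Int × Int := ([3, 1, 2], 5)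

def Spec_solution (food_times : List Int) (k : Int) (out : Int) : Prop := out = solution_alt food_times k
instance (food_times : List Int) (k : Int) (out : Int) : Decidable (Spec_solution food_times k out) := by
  unfold Spec_solution; infer_instance

-- ===== CLAIM (what is proved, stated in full; the proofs are below) =====
def Claim_equal_solution : Prop := ∀ (food_times : List Int) (k : Int), Dom_solution food_times k → Pre_solution food_times k → Spec_solution food_times k (solution food_times k)

-- ===== LEMMAS AND PROOFS =====

-- closed-form quantities both programs track
def spentF (ft : List Int) (v : Int) : Int := (ft.map (fun x => min x v)).sum
def cntGt (ft : List Int) (v : Int) : Int := (ft.countP (fun x => decide (v < x)) : Int)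

-- the indices of the foods still on the plate once every food with time ≤ v is finished
def altRest (food_times : List Int) (t : Int) : List Int :=
  (PySem.List.pyRange 0 (food_times.length : Int) 1).filter
    (fun i => decide (t < PySem.List.pyGetD food_times i 0))

-- the common reference value: the state of A's loop at the first interrupting distinct time
def aFold (ft : List Int) (k : Int) : List Int → Int
  | [] => 0
  | v :: rest =>
    if cntGt ft v ≤ 0 then -1
    else if k - spentF ft v < cntGt ft v then
      PySem.List.pyGetD (altRest ft v) (max (k - spentF ft v) 0) 0 + 1
    else aFold ft k rest


-- ---------- A's selection scan: find_left_food / eatLoop pick successive elements of altRest ----------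

-- "r is the first element of L that is ≥ s"
def IsFirstFrom (L : List Int) (s r : Int) : Prop := r ∈ L ∧ s ≤ r ∧ ∀ i ∈ L, s ≤ i → r ≤ i

lemma mem_altRest {ft : List Int} {t i : Int} :
    i ∈ altRest ft t ↔ (0 ≤ i ∧ i < (ft.length : Int)) ∧ t < PySem.List.pyGetD ft i 0 := by
  simp [altRest, List.mem_filter, PySem.List.mem_pyRange_one]

lemma pairwise_altRest (ft : List Int) (t : Int) : (altRest ft t).Pairwise (· < ·) :=
  (PySem.List.pairwise_lt_pyRange_one 0 (ft.length : Int)).filter _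

lemma length_altRest (ft : List Int) (t : Int) :
    (altRest ft t).length = ft.countP (fun x => decide (t < x)) := by
  unfold altRest
  conv_rhs => rw [← PySem.List.map_pyGetD_pyRange_zero (xs := ft) (d := 0)]
  rw [List.countP_map, ← List.countP_eq_length_filter]
  simp [PySem.List.len_eq]
  rfl

lemma isFirstFrom_head {L : List Int} (hpw : L.Pairwise (· < ·))
    (hnn : ∀ i ∈ L, 0 ≤ i) (h0 : 0 < L.length) : IsFirstFrom L 0 L[0] := by
  refine ⟨L.getElem_mem h0, hnn _ (L.getElem_mem h0), ?_⟩
  intro i hi _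
  obtain ⟨m, hm, rfl⟩ := List.mem_iff_getElem.1 hi
  rcases Nat.eq_zero_or_pos m with rfl | hmp
  · exact le_refl _
  · exact le_of_lt ((List.pairwise_iff_getElem.1 hpw) 0 m h0 hm hmp)

lemma isFirstFrom_succ {L : List Int} (hpw : L.Pairwise (· < ·)) {m : Nat}
    (hm : m + 1 < L.length) : IsFirstFrom L (L[m] + 1) L[m + 1] := by
  have hmono := List.pairwise_iff_getElem.1 hpw
  refine ⟨L.getElem_mem hm, by have := hmono m (m+1) (by omega) hm (by omega); omega, ?_⟩
  intro i hi hle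
  obtain ⟨m', hm', rfl⟩ := List.mem_iff_getElem.1 hi
  have hgt : m < m' := by
    by_contra h
    push Not at h
    rcases Nat.lt_or_ge m' m with h' | h'
    · have := hmono m' m (by omega) (by omega) h'; omega
    · have : m' = m := by omega
      subst this; omega
  rcases Nat.eq_or_lt_of_le hgt with h' | h'
  · simp [← h']
  · exact le_of_lt (hmono (m+1) m' hm hm' h')

lemma flfAux_first (ft : List Int) (lk : Int) :
    ∀ (fuel s : Nat), ft.length + 1 ≤ fuel + s →
      (∃ i ∈ altRest ft lk, (s : Int) ≤ i) →
      IsFirstFrom (altRest ft lk) (s : Int) (flfAux ft lk fuel (s : Int)) := by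
  intro fuel
  induction fuel with
  | zero =>
    intro s hfuel ⟨i, hiL, hsi⟩
    have := (mem_altRest.1 hiL).1
    omega
  | succ fuel ih =>
    intro s hfuel ⟨i, hiL, hsi⟩
    have hibd := (mem_altRest.1 hiL).1
    have hslt : s < ft.length := by omega
    rw [flfAux]
    rw [PySem.List.pyGet?_natCast, List.getElem?_eq_getElem hslt]
    simp only
    by_cases hv : ft[s] > lk
    · rw [if_pos hv]
      refine ⟨mem_altRest.2 ⟨⟨by omega, by omega⟩, ?_⟩, le_refl _, fun i hi h => h⟩
      rw [PySem.List.pyGetD_natCast, List.getD_eq_getElem ft 0 hslt]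
      exact hv
    · rw [if_neg hv]
      have hsnot : ((s : Int)) ∉ altRest ft lk := by
        intro hmem
        have := (mem_altRest.1 hmem).2
        rw [PySem.List.pyGetD_natCast, List.getD_eq_getElem ft 0 hslt] at this
        omega
      have hne : i ≠ (s : Int) := fun h => hsnot (h ▸ hiL)
      have hcast : (s : Int) + 1 = ((s + 1 : Nat) : Int) := by push_cast; ring
      rw [hcast]
      have hex : ∃ i ∈ altRest ft lk, ((s + 1 : Nat) : Int) ≤ i := ⟨i, hiL, by push_cast; omega⟩
      obtain ⟨h1, h2, h3⟩ := ih (s + 1) (by omega) hex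
      refine ⟨h1, by push_cast at h2 ⊢; omega, ?_⟩
      intro j hj hsj
      rcases eq_or_ne j (s : Int) with rfl | hjne
      · exact absurd hj hsnot
      · exact h3 j hj (by push_cast; omega)

lemma altRest_nonneg {ft : List Int} {t i : Int} (h : i ∈ altRest ft t) : 0 ≤ i :=
  (mem_altRest.1 h).1.1

lemma isFirstFrom_unique {L : List Int} {s r r' : Int}
    (h : IsFirstFrom L s r) (h' : IsFirstFrom L s r') : r = r' :=
  le_antisymm (h.2.2 r' h'.1 h'.2.1) (h'.2.2 r h.1 h.2.1)

lemma find_eq_of_first {ft : List Int} {lk : Int} {s : Nat} {r : Int}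
    (hex : ∃ i ∈ altRest ft lk, (s : Int) ≤ i)
    (hfirst : IsFirstFrom (altRest ft lk) (s : Int) r) :
    find_left_food ft (s : Int) lk = r := by
  have h := flfAux_first ft lk (ft.length + 1) s (by omega) hex
  exact isFirstFrom_unique h hfirst

lemma eatLoop_getElem (ft : List Int) (lk : Int) :
    ∀ (fuel m : Nat) (h : m + fuel < (altRest ft lk).length),
      eatLoop ft lk fuel ((altRest ft lk)[m]'(by omega)) = (altRest ft lk)[m + fuel] := by
  intro fuel
  induction fuel with
  | zero => intro m h; simp [eatLoop]
  | succ fuel ih =>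
    intro m h
    rw [eatLoop]
    set L := altRest ft lk with hL
    have hm1 : m + 1 < L.length := by omega
    have hnn : 0 ≤ L[m] := altRest_nonneg (L.getElem_mem (by omega))
    have hcast : L[m]'(by omega) + 1 = ((L[m].toNat + 1 : Nat) : Int) := by omega
    have hfirst : IsFirstFrom L (((L[m].toNat + 1 : Nat) : Int)) L[m+1] := by
      rw [← hcast]
      exact isFirstFrom_succ (pairwise_altRest ft lk) hm1
    have hex : ∃ i ∈ L, ((L[m].toNat + 1 : Nat) : Int) ≤ i :=
      ⟨L[m+1], L.getElem_mem hm1, hfirst.2.1⟩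
    rw [hcast, find_eq_of_first hex hfirst]
    have := ih (m + 1) (by omega)
    rw [this]
    congr 1
    omega

lemma branch_eq (ft : List Int) (key k' : Int) (h0 : 0 < (altRest ft key).length)
    (hk : k' < ((altRest ft key).length : Int)) :
    eatLoop ft key k'.toNat (find_left_food ft 0 key)
      = PySem.List.pyGetD (altRest ft key) (max k' 0) 0 := by
  set L := altRest ft key with hL
  have hfirst : IsFirstFrom L 0 L[0] :=
    isFirstFrom_head (pairwise_altRest ft key) (fun i hi => altRest_nonneg hi) h0
  have hex : ∃ i ∈ L, (0 : Int) ≤ i := ⟨L[0], L.getElem_mem h0, hfirst.2.1⟩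
  have hfind : find_left_food ft 0 key = L[0] := by
    have := find_eq_of_first (s := 0) (by exact_mod_cast hex) (by exact_mod_cast hfirst)
    simpa using this
  rw [hfind]
  have hlt : 0 + k'.toNat < L.length := by omega
  rw [eatLoop_getElem ft key k'.toNat 0 hlt]
  rw [PySem.List.pyGetD_eq_getElem L 0 (by omega) (by omega)]
  congr 1
  omega

-- ---------- arithmetic facts about the closed-form quantities ----------

lemma countP_le_split (ft : List Int) (hd : Int) :
    ft.countP (fun x => decide (hd ≤ x)) = ft.countP (fun x => decide (hd < x)) + ft.count hd := by
  induction ft with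
  | nil => simp
  | cons x l ih =>
    rw [List.countP_cons, List.countP_cons, List.count_cons]
    rcases lt_trichotomy hd x with h | h | h
    · simp only [decide_eq_true_eq]
      rw [if_pos (le_of_lt h), if_pos h, if_neg (by simp only [beq_iff_eq]; omega)]
      omega
    · subst h
      simp only [decide_eq_true_eq]
      rw [if_pos le_rfl, if_neg (lt_irrefl hd), if_pos (by simp)]
      omega
    · simp only [decide_eq_true_eq]
      rw [if_neg (by omega : ¬ hd ≤ x), if_neg (by omega : ¬ hd < x),
        if_neg (by simp only [beq_iff_eq]; omega)]
      omega

lemma spent_step (ft : List Int) (u v : Int) (huv : u ≤ v)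
    (hgap : ∀ x ∈ ft, x ≤ u ∨ v ≤ x) :
    spentF ft v - spentF ft u = cntGt ft u * (v - u) := by
  induction ft with
  | nil => simp [spentF, cntGt]
  | cons x l ih =>
    have hx := hgap x List.mem_cons_self
    have ihl := ih (fun y hy => hgap y (List.mem_cons_of_mem _ hy))
    simp only [spentF, cntGt, List.map_cons, List.sum_cons, List.countP_cons] at ihl ⊢
    rcases hx with h | h
    · rw [min_eq_left (le_trans h huv), min_eq_left h]
      simp only [decide_eq_false (not_lt.2 h : ¬ u < x), if_neg]
      push_cast
      push_cast at ihl
      nlinarith [ihl]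
    · rw [min_eq_right h, min_eq_right (le_trans huv h)]
      have hux : u < x ∨ (u = v ∧ v ≤ x) := by omega
      by_cases hu : u < x
      · simp only [decide_eq_true_eq, if_pos hu]
        push_cast
        push_cast at ihl
        nlinarith [ihl]
      · have huv' : u = v := by omega
        subst huv'
        simp only [hu, decide_eq_false hu, if_neg]
        push_cast
        push_cast at ihl
        nlinarith [ihl]

lemma spent_min (ft : List Int) (v : Int) (hmin : ∀ x ∈ ft, v ≤ x) :
    spentF ft v = (ft.length : Int) * v := by
  induction ft with
  | nil => simp [spentF]
  | cons x l ih =>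
    have hx := hmin x List.mem_cons_self
    have ihl := ih (fun y hy => hmin y (List.mem_cons_of_mem _ hy))
    simp only [spentF, List.map_cons, List.sum_cons, List.length_cons] at ihl ⊢
    rw [min_eq_right hx, ihl]
    push_cast
    ring

lemma good_mono (ft : List Int) (k u v : Int) (huv : u ≤ v)
    (h : k - spentF ft u < cntGt ft u) : k - spentF ft v < cntGt ft v := by
  have key : spentF ft u + cntGt ft u ≤ spentF ft v + cntGt ft v := by
    clear h
    induction ft with
    | nil => simp [spentF, cntGt]
    | cons x l ih =>
      simp only [spentF, cntGt, List.map_cons, List.sum_cons, List.countP_cons] at ih ⊢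
      have hx : min x u + (if u < x then (1:Int) else 0)
          ≤ min x v + (if v < x then (1:Int) else 0) := by
        rcases le_total x u with h1 | h1
        · rw [min_eq_left h1, min_eq_left (le_trans h1 huv)]
          split_ifs <;> omega
        · rw [min_eq_right h1]
          rcases le_total x v with h2 | h2
          · rw [min_eq_left h2]
            split_ifs <;> omega
          · rw [min_eq_right h2]
            split_ifs <;> omega
      push_cast
      push_cast at ih
      simp only [decide_eq_true_eq]
      by_cases h1 : u < x <;> by_cases h2 : v < x <;>
        simp only [h1, h2, if_true, if_false, decide_true, decide_false,
          Bool.false_eq_true, if_pos, if_neg] <;>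
        simp [h1, h2] at hx <;> omega
  omega

-- ---------- A's loop equals aFold ----------

lemma loopA (ft : List Int) (k : Int) :
    ∀ (rest : List Int) (hd k_cur fl prev : Int),
      (hd :: rest).Pairwise (· < ·) →
      (∀ y ∈ hd :: rest, y ∈ ft) →
      (∀ x ∈ ft, hd < x → x ∈ rest) →
      fl = (ft.countP (fun x => decide (hd ≤ x)) : Int) →
      k_cur - fl * (hd - prev) = k - spentF ft hd →
      solLoop ft (PySem.Dict.counter ft) (hd :: rest) k_cur fl prev = aFold ft k (hd :: rest) := by
  intro rest
  induction rest with
  | nil =>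
    intro hd k_cur fl prev hpw hsub hcov hfl hk
    have hcnt : cntGt ft hd = 0 := by
      unfold cntGt
      norm_cast
      rw [List.countP_eq_zero]
      intro x hx
      simp only [decide_eq_true_eq, not_lt]
      by_contra h
      exact absurd (hcov x hx (by omega)) (List.not_mem_nil)
    have hflc : fl - (ft.count hd : Int) = cntGt ft hd := by
      rw [hfl]
      unfold cntGt
      have := countP_le_split ft hd
      push_cast
      omega
    rw [solLoop, aFold]
    simp only [PySem.Dict.getD_counter]
    rw [hflc, if_pos (by omega : cntGt ft hd ≤ 0), if_pos (le_of_eq hcnt)]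
  | cons hd' rest' ih =>
    intro hd k_cur fl prev hpw hsub hcov hfl hk
    have hhd' : hd < hd' := (List.pairwise_cons.1 hpw).1 hd' List.mem_cons_self
    have hrest_pw : (hd' :: rest').Pairwise (· < ·) := hpw.of_cons
    have hhd'min : ∀ y ∈ hd' :: rest', hd' ≤ y := by
      intro y hy
      rcases List.mem_cons.1 hy with rfl | hy'
      · exact le_rfl
      · exact le_of_lt ((List.pairwise_cons.1 hrest_pw).1 y hy')
    have hgap : ∀ x ∈ ft, x ≤ hd ∨ hd' ≤ x := by
      intro x hx
      by_cases h : hd < x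
      · exact Or.inr (hhd'min x (hcov x hx h))
      · exact Or.inl (by omega)
    have hflc : fl - (ft.count hd : Int) = cntGt ft hd := by
      rw [hfl]
      unfold cntGt
      have := countP_le_split ft hd
      push_cast
      omega
    rw [solLoop, aFold]
    simp only [PySem.Dict.getD_counter]
    rw [hflc, hk]
    by_cases hz : cntGt ft hd ≤ 0
    · rw [if_pos hz, if_pos hz]
    · rw [if_neg hz, if_neg hz]
      by_cases hg : k - spentF ft hd < cntGt ft hd
      · rw [if_pos hg, if_pos hg]
        have hlen : ((altRest ft hd).length : Int) = cntGt ft hd := by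
          rw [length_altRest]; rfl
        congr 1
        exact branch_eq ft hd (k - spentF ft hd) (by omega) (by omega)
      · rw [if_neg hg, if_neg hg]
        apply ih hd' (k - spentF ft hd) (cntGt ft hd) hd hrest_pw
          (fun y hy => hsub y (List.mem_cons_of_mem _ hy))
        · intro x hx hlt
          have hx' : x ∈ hd' :: rest' := hcov x hx (lt_trans hhd' hlt)
          rcases List.mem_cons.1 hx' with rfl | h
          · omega
          · exact h
        · unfold cntGt
          congr 1
          apply List.countP_congr
          intro x hx
          have h := hgap x hx
          simp only [decide_eq_true_eq]
          omega
        · have := spent_step ft hd hd' (le_of_lt hhd') hgap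
          linarith

-- ---------- generic binary-search lemma for bfirst ----------

lemma bfirst_eq (pred : Int → Bool) :
    ∀ (fuel : Nat) (lo hi t : Int), (hi - lo).toNat ≤ fuel →
      lo ≤ t → t ≤ hi →
      (∀ i, lo ≤ i → i < t → pred i = false) →
      (∀ i, t ≤ i → i < hi → pred i = true) →
      bfirst pred fuel lo hi = t := by
  intro fuel
  induction fuel with
  | zero =>
    intro lo hi t hfuel h1 h2 _ _
    rw [bfirst]
    omega
  | succ fuel ih =>
    intro lo hi t hfuel h1 h2 hf ht
    rw [bfirst]
    by_cases hlh : lo < hi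
    · rw [if_pos hlh]
      have hmid := PySem.Int.floordiv_two_mid_bounds (le_of_lt hlh)
      have hdm := PySem.Int.floordiv_mul_add_mod (lo + hi) 2
      have hm0 : (0:Int) ≤ PySem.Int.mod (lo + hi) 2 := PySem.Int.mod_nonneg _ (by norm_num)
      have hm2 : PySem.Int.mod (lo + hi) 2 < 2 := PySem.Int.mod_lt _ (by norm_num)
      set mid := PySem.Int.floordiv (lo + hi) 2 with hm
      have hmlt : mid < hi := by omega
      simp only
      by_cases hp : pred mid = true
      · rw [if_pos hp]
        have htm : t ≤ mid := by
          by_contra h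
          push_neg at h
          have := hf mid (by omega) (by omega)
          rw [this] at hp
          exact Bool.false_ne_true hp
        exact ih lo mid t (by omega) h1 htm hf (fun i hi1 hi2 => ht i hi1 (by omega))
      · rw [if_neg hp]
        have htm : mid < t := by
          by_contra h
          push_neg at h
          exact hp (ht mid h (by omega))
        exact ih (mid + 1) hi t (by omega) (by omega) h2
          (fun i hi1 hi2 => hf i (by omega) hi2) ht
    · rw [if_neg hlh]
      omega

-- ---------- sorted-list partition at a value v ----------

lemma takeWhile_count (v : Int) :
    ∀ (l : List Int), l.Pairwise (· ≤ ·) →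
      (l.takeWhile (fun x => decide (x ≤ v))).length = l.countP (fun x => decide (x ≤ v)) := by
  intro l
  induction l with
  | nil => simp
  | cons x l ih =>
    intro hpw
    by_cases h : x ≤ v
    · rw [List.takeWhile_cons_of_pos (by simpa using h)]
      simp [h, ih hpw.of_cons]
    · rw [List.takeWhile_cons_of_neg (by simpa using h), List.countP_cons]
      simp only [h, decide_false]
      rw [List.countP_eq_zero.2 ?_]
      · simp
      · intro y hy
        have := (List.pairwise_cons.1 hpw).1 y hy
        simp only [decide_eq_true_eq]
        omega

lemma dropWhile_gt (v : Int) :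
    ∀ (l : List Int), l.Pairwise (· ≤ ·) →
      ∀ x ∈ l.dropWhile (fun x => decide (x ≤ v)), v < x := by
  intro l
  induction l with
  | nil => simp
  | cons x l ih =>
    intro hpw y hy
    by_cases h : x ≤ v
    · rw [List.dropWhile_cons_of_pos (by simpa using h)] at hy
      exact ih hpw.of_cons y hy
    · rw [List.dropWhile_cons_of_neg (by simpa using h)] at hy
      rcases List.mem_cons.1 hy with rfl | hy'
      · omega
      · have := (List.pairwise_cons.1 hpw).1 y hy'
        omega

-- ---------- the prefix-sum fold ----------

lemma prefix_fold :
    ∀ (ts acc0 : List Int) (s : Int),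
      (ts.foldl (fun (acc : List Int × Int) t => (acc.1 ++ [acc.2 + t], acc.2 + t)) (acc0, s)).1
        = acc0 ++ (List.range ts.length).map (fun i => s + (ts.take (i+1)).sum) := by
  intro ts
  induction ts with
  | nil => simp
  | cons t ts ih =>
    intro acc0 s
    rw [List.foldl_cons, ih]
    have hmap : (List.range (t :: ts).length).map (fun i => s + ((t :: ts).take (i+1)).sum)
        = (s + t) :: (List.range ts.length).map (fun i => s + t + (ts.take (i+1)).sum) := by
      rw [List.length_cons, List.range_succ_eq_map, List.map_cons, List.map_map]
      congr 1
      · simp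
      · apply List.map_congr_left
        intro i _
        simp only [Function.comp_apply, Nat.succ_eq_add_one, List.take_succ_cons, List.sum_cons]
        ring
    rw [hmap]
    simp

-- ---------- B's spent/left closed form ----------

lemma spentLeft_eq (ft : List Int) (v : Int) :
    spentLeft (PySem.List.sorted ft (fun x => x) false)
        (((PySem.List.sorted ft (fun x => x) false).foldl
          (fun (acc : List Int × Int) t => (acc.1 ++ [acc.2 + t], acc.2 + t)) ([0], 0)).1)
        (ft.length : Int) v ft.length
      = (spentF ft v, cntGt ft v) := by
  set ts := PySem.List.sorted ft (fun x => x) false with hts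
  have hlen : ts.length = ft.length := PySem.List.length_sorted ft (fun x => x) false
  have hperm : ts.Perm ft := PySem.List.sorted_perm ft (fun x => x) false
  have hpw : ts.Pairwise (· ≤ ·) := PySem.List.sorted_pairwise ft (fun x => x)
  set tw := ts.takeWhile (fun x => decide (x ≤ v)) with htw
  set dw := ts.dropWhile (fun x => decide (x ≤ v)) with hdw
  have hsplit : ts = tw ++ dw := (List.takeWhile_append_dropWhile).symm
  set c := ts.countP (fun x => decide (x ≤ v)) with hc
  have hcl : tw.length = c := takeWhile_count v ts hpw
  have hcle : c ≤ ts.length := by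
    rw [hc]
    apply List.countP_le_length
  have hlensum : tw.length + dw.length = ts.length := by
    conv_rhs => rw [hsplit]
    exact (List.length_append).symm
  have htw_le : ∀ x ∈ tw, x ≤ v := by
    intro x hx
    simpa using List.mem_takeWhile_imp hx
  have hdw_gt : ∀ x ∈ dw, v < x := dropWhile_gt v ts hpw
  -- the binary search computes c
  have hrank : bfirst (fun i => decide (v < PySem.List.pyGetD ts i 0)) ft.length 0
      (ft.length : Int) = (c : Int) := by
    apply bfirst_eq _ ft.length 0 (ft.length : Int) (c : Int) (by omega)
      (by positivity) (by exact_mod_cast hcle.trans hlen.le)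
    · intro i h0 hi
      have hilt : i.toNat < tw.length := by omega
      have hilt2 : i.toNat < ts.length := by omega
      rw [PySem.List.pyGetD_eq_getElem ts 0 h0 (by omega)]
      have hsplit2 : i.toNat < (tw ++ dw).length := by rw [← hsplit]; exact hilt2
      have he : ts[i.toNat]'hilt2 = (tw ++ dw)[i.toNat]'hsplit2 := List.getElem_of_eq hsplit _
      rw [List.getElem_append_left hilt] at he
      rw [he]
      simpa using not_lt.2 (htw_le _ (List.getElem_mem hilt))
    · intro i h0 hi
      have h0' : (0:Int) ≤ i := le_trans (by positivity) h0
      have hilt2 : i.toNat < ts.length := by omega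
      have hige : tw.length ≤ i.toNat := by omega
      rw [PySem.List.pyGetD_eq_getElem ts 0 h0' (by omega)]
      have hsplit2 : i.toNat < (tw ++ dw).length := by rw [← hsplit]; exact hilt2
      have hdwlt : i.toNat - tw.length < dw.length := by
        have := hlensum
        omega
      have he : ts[i.toNat]'hilt2 = (tw ++ dw)[i.toNat]'hsplit2 := List.getElem_of_eq hsplit _
      rw [List.getElem_append_right hige] at he
      rw [he]
      simpa using hdw_gt _ (List.getElem_mem hdwlt)
  -- the prefix array at c is the sum of the first c sorted times
  have hpre : PySem.List.pyGetD
      ((ts.foldl (fun (acc : List Int × Int) t => (acc.1 ++ [acc.2 + t], acc.2 + t))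
        ([0], 0)).1) (c : Int) 0 = (ts.take c).sum := by
    rw [prefix_fold ts [0] 0]
    rcases Nat.eq_zero_or_pos c with hc0 | hcpos
    · rw [hc0]
      simp
    · obtain ⟨j, hcj⟩ : ∃ j, c = j + 1 := ⟨c - 1, by omega⟩
      have hj : j < ts.length := by omega
      rw [hcj, PySem.List.pyGetD_natCast]
      show ((0:Int) :: (List.range ts.length).map (fun i => 0 + (ts.take (i+1)).sum)).getD
        (j+1) 0 = (ts.take (j+1)).sum
      rw [List.getD_cons_succ]
      rw [List.getD_eq_getElem _ 0 (by simpa using hj)]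
      simp [hj]
  -- take c of ts is exactly tw
  have htake : ts.take c = tw := by
    conv_lhs => rw [hsplit, ← hcl]
    exact List.take_left
  -- the closed forms
  have hspent : spentF ft v = (ts.take c).sum + v * ((ft.length : Int) - (c : Int)) := by
    unfold spentF
    have hmap : (ft.map (fun x => min x v)).sum = (ts.map (fun x => min x v)).sum :=
      (List.Perm.sum_eq (hperm.map _)).symm
    rw [hmap, htake]
    conv_lhs => rw [hsplit]
    rw [List.map_append, List.sum_append]
    have h1 : (tw.map (fun x => min x v)).sum = tw.sum := by
      congr 1
      conv_rhs => rw [← List.map_id tw]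
      apply List.map_congr_left
      intro x hx
      exact min_eq_left (htw_le x hx)
    have h2 : (dw.map (fun x => min x v)).sum = (dw.length : Int) * v := by
      have : dw.map (fun x => min x v) = dw.map (fun _ => v) := by
        apply List.map_congr_left
        intro x hx
        exact min_eq_right (le_of_lt (hdw_gt x hx))
      rw [this, PySem.List.sum_map_const_int]
    rw [h1, h2]
    have : (dw.length : Int) = (ft.length : Int) - (c : Int) := by
      have := hlensum
      push_cast
      omega
    rw [this]
    ring
  have hcnt : cntGt ft v = (ft.length : Int) - (c : Int) := by
    unfold cntGt
    rw [← List.Perm.countP_eq _ hperm]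
    conv_lhs => rw [hsplit]
    rw [List.countP_append]
    have h1 : tw.countP (fun x => decide (v < x)) = 0 := by
      rw [List.countP_eq_zero]
      intro x hx
      simpa using not_lt.2 (htw_le x hx)
    have h2 : dw.countP (fun x => decide (v < x)) = dw.length := by
      rw [List.countP_eq_length]
      intro x hx
      simpa using hdw_gt x hx
    rw [h1, h2]
    have := hlensum
    push_cast
    omega
  unfold spentLeft
  simp only
  rw [hrank, hpre, hspent, hcnt]

-- ---------- B's selection scan ----------

lemma pickScan_aux (v : Int) :
    ∀ (pairs : List (Int × Int)) (r seen : Int), seen ≤ r →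
      (r - seen).toNat < ((pairs.filter (fun p => decide (v < p.2))).map Prod.fst).length →
      pickScan v r pairs seen
        = ((pairs.filter (fun p => decide (v < p.2))).map Prod.fst).getD (r - seen).toNat 0
            + 1 := by
  intro pairs
  induction pairs with
  | nil =>
    intro r seen hs hlt
    simp at hlt
  | cons p rest ih =>
    obtain ⟨i, t⟩ := p
    intro r seen hs hlt
    rw [pickScan]
    by_cases hp : t > v
    · rw [if_pos hp]
      have hf : ((i, t) :: rest).filter (fun p => decide (v < p.2))
          = (i, t) :: rest.filter (fun p => decide (v < p.2)) :=
        List.filter_cons_of_pos (by simpa using hp)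
      rw [hf] at hlt ⊢
      by_cases hseen : seen = r
      · rw [if_pos hseen]
        rw [hseen, sub_self]
        simp
      · rw [if_neg hseen]
        have hslt : seen < r := lt_of_le_of_ne hs hseen
        rw [ih r (seen + 1) (by omega) (by simp at hlt ⊢; omega)]
        have : (r - seen).toNat = (r - (seen + 1)).toNat + 1 := by omega
        rw [this]
        simp only [List.map_cons, List.getD_cons_succ]
    · rw [if_neg hp]
      have hf : ((i, t) :: rest).filter (fun p => decide (v < p.2))
          = rest.filter (fun p => decide (v < p.2)) :=
        List.filter_cons_of_neg (by simpa using hp)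
      rw [hf] at hlt ⊢
      exact ih r seen hs hlt

lemma altRest_enum (ft : List Int) (v : Int) :
    ((PySem.List.enumerate ft 0).filter (fun p => decide (v < p.2))).map Prod.fst
      = altRest ft v := by
  rw [PySem.List.enumerate_eq_map_pyRange (d := 0)]
  rw [List.filter_map, List.map_map]
  have h1 : (Prod.fst ∘ (fun j => (j, PySem.List.pyGetD ft j 0))) = fun j : Int => j := by
    funext j; rfl
  have h2 : ((fun p : Int × Int => decide (v < p.2)) ∘ (fun j => (j, PySem.List.pyGetD ft j 0)))
      = fun j => decide (v < PySem.List.pyGetD ft j 0) := by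
    funext j; rfl
  rw [h1, h2]
  unfold altRest
  simp [PySem.List.len_eq]

lemma pickScan_eq (ft : List Int) (v r : Int) (h0 : 0 ≤ r)
    (hr : r < ((altRest ft v).length : Int)) :
    pickScan v r (PySem.List.enumerate ft 0) 0
      = PySem.List.pyGetD (altRest ft v) r 0 + 1 := by
  have haux := pickScan_aux v (PySem.List.enumerate ft 0) r 0 h0
    (by rw [altRest_enum]; omega)
  rw [altRest_enum] at haux
  rw [haux, PySem.List.pyGetD_eq_getElem _ 0 h0 hr]
  congr 1
  rw [show (r - 0).toNat = r.toNat by omega]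
  exact List.getD_eq_getElem _ 0 (by omega)

lemma cntGt_pos (ft vals : List Int) (hpw : vals.Pairwise (· < ·))
    (hsub : ∀ y ∈ vals, y ∈ ft) (j : Nat) (hj : j + 1 < vals.length) :
    0 < cntGt ft (vals.getD j 0) := by
  unfold cntGt
  have hmem : vals[j+1] ∈ ft := hsub _ (List.getElem_mem hj)
  have hlt : vals.getD j 0 < vals[j+1] := by
    rw [List.getD_eq_getElem _ 0 (by omega)]
    exact (List.pairwise_iff_getElem.1 hpw) j (j+1) (by omega) hj (by omega)
  have hpos : 0 < ft.countP (fun x => decide (vals.getD j 0 < x)) :=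
    List.countP_pos_iff.2 ⟨_, hmem, by simpa using hlt⟩
  exact_mod_cast hpos

-- ---------- aFold along the distinct sorted values, described by the first good index ----------

lemma aFold_drop (ft : List Int) (k : Int) (t : Nat) :
    ∀ (vals : List Int), vals.Pairwise (· < ·) → (∀ y ∈ vals, y ∈ ft) →
      (∀ x ∈ ft, x ∈ vals) →
      t ≤ vals.length - 1 →
      (∀ i : Nat, i < t → ¬ (k - spentF ft (vals.getD i 0) < cntGt ft (vals.getD i 0))) →
      (t < vals.length - 1 → k - spentF ft (vals.getD t 0) < cntGt ft (vals.getD t 0)) →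
      ∀ j : Nat, j ≤ t → vals ≠ [] →
      aFold ft k (vals.drop j)
        = if t = vals.length - 1 then -1
          else PySem.List.pyGetD (altRest ft (vals.getD t 0))
                (max (k - spentF ft (vals.getD t 0)) 0) 0 + 1 := by
  intro vals hpw hsub hcov ht hfalse htrue
  have hmono := List.pairwise_iff_getElem.1 hpw
  have cntpos : ∀ j : Nat, j + 1 < vals.length → 0 < cntGt ft (vals.getD j 0) :=
    fun j hj => cntGt_pos ft vals hpw hsub j hj
  have cntlast : vals ≠ [] → cntGt ft (vals.getD (vals.length - 1) 0) ≤ 0 := by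
    intro hne
    have hlpos : 0 < vals.length := List.length_pos_iff.2 hne
    unfold cntGt
    have hz : ft.countP (fun x => decide (vals.getD (vals.length - 1) 0 < x)) = 0 := by
      rw [List.countP_eq_zero]
      intro x hx
      have hxv : x ∈ vals := hcov x hx
      obtain ⟨i, hi, rfl⟩ := List.mem_iff_getElem.1 hxv
      simp only [decide_eq_true_eq, not_lt]
      rw [List.getD_eq_getElem _ 0 (by omega)]
      rcases Nat.lt_or_ge i (vals.length - 1) with h | h
      · exact le_of_lt (hmono i (vals.length - 1) hi (by omega) h)
      · have he : vals[i] = vals[vals.length - 1]'(by omega) := by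
          congr 1
          omega
        exact le_of_eq he
    rw [hz]
    simp
  suffices h : ∀ (d j : Nat), vals.length - j ≤ d → j ≤ t → vals ≠ [] →
      aFold ft k (vals.drop j)
        = if t = vals.length - 1 then -1
          else PySem.List.pyGetD (altRest ft (vals.getD t 0))
                (max (k - spentF ft (vals.getD t 0)) 0) 0 + 1 by
    intro j hj hne
    exact h vals.length j (by omega) hj hne
  intro d
  induction d with
  | zero =>
    intro j hd hj hne
    have : 0 < vals.length := List.length_pos_iff.2 hne
    omega
  | succ d ihd =>
    intro j hd hj hne
    have hlpos : 0 < vals.length := List.length_pos_iff.2 hne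
    have hjlt : j < vals.length := by omega
    rw [List.drop_eq_getElem_cons hjlt, aFold]
    have hgetD : vals.getD j 0 = vals[j] := List.getD_eq_getElem _ 0 hjlt
    rcases Nat.lt_or_ge j (vals.length - 1) with hjm | hjm
    · rw [if_neg (by rw [← hgetD]; have := cntpos j (by omega); omega)]
      rcases Nat.lt_or_ge j t with hjt | hjt
      · rw [if_neg (by rw [← hgetD]; exact hfalse j hjt)]
        exact ihd (j+1) (by omega) (by omega) hne
      · have hjt' : j = t := by omega
        subst hjt'
        rw [if_pos (by rw [← hgetD]; exact htrue hjm)]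
        rw [if_neg (by omega : ¬ j = vals.length - 1), hgetD]
    · have hj' : j = vals.length - 1 := by omega
      have ht' : t = vals.length - 1 := by omega
      rw [if_pos (by rw [← hgetD, hj']; exact cntlast hne), if_pos ht']

-- ===== VERDICT (by name: the statement is the Claim_ definition above) =====
theorem solution_spec : Claim_equal_solution := by
  unfold Claim_equal_solution
  intro ft k _ hpre
  unfold Spec_solution
  unfold Pre_solution at hpre
  set vals := PySem.List.sorted (PySem.Set.ofList ft) (fun x => x) false with hvals
  have hpw : vals.Pairwise (· < ·) := PySem.List.sorted_ofList_pairwise_lt ft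
  have hmem : ∀ x, x ∈ vals ↔ x ∈ ft := fun x => by
    rw [hvals, PySem.List.mem_sorted, PySem.Set.mem_ofList]
  have hvne : vals ≠ [] := by
    intro h
    obtain ⟨a, l, hft⟩ := List.exists_cons_of_ne_nil hpre
    have ha : a ∈ vals := (hmem a).2 (by rw [hft]; exact List.mem_cons_self)
    rw [h] at ha
    exact (List.not_mem_nil) ha
  have hm1 : 0 < vals.length := List.length_pos_iff.2 hvne
  have hsub : ∀ y ∈ vals, y ∈ ft := fun y hy => (hmem y).1 hy
  have hcov : ∀ x ∈ ft, x ∈ vals := fun x hx => (hmem x).2 hx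
  -- t = the first distinct time at which the broadcast interrupts (or last index if none)
  obtain ⟨t, ht_le, hfalse, htrue⟩ :
      ∃ t : Nat, t ≤ vals.length - 1 ∧
        (∀ i : Nat, i < t →
          ¬ (k - spentF ft (vals.getD i 0) < cntGt ft (vals.getD i 0))) ∧
        (t < vals.length - 1 →
          (k - spentF ft (vals.getD t 0) < cntGt ft (vals.getD t 0))) := by
    by_cases hex : ∃ i : Nat, i < vals.length - 1 ∧
        (k - spentF ft (vals.getD i 0) < cntGt ft (vals.getD i 0))
    · refine ⟨Nat.find hex, ?_, ?_, fun _ => (Nat.find_spec hex).2⟩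
      · have := (Nat.find_spec hex).1
        omega
      · intro i hi hgood
        have hilt : i < vals.length - 1 := by
          have := (Nat.find_spec hex).1
          omega
        exact (Nat.find_min hex hi) ⟨hilt, hgood⟩
    · refine ⟨vals.length - 1, le_refl _, ?_, fun h => absurd h (by omega)⟩
      intro i hi hgood
      exact hex ⟨i, by omega, hgood⟩
  -- the monotone goodness predicate along vals
  have hgoodmono : ∀ (i j : Nat), i ≤ j → j < vals.length →
      (k - spentF ft (vals.getD i 0) < cntGt ft (vals.getD i 0)) →
      (k - spentF ft (vals.getD j 0) < cntGt ft (vals.getD j 0)) := by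
    intro i j hij hj hg
    apply good_mono ft k (vals.getD i 0) (vals.getD j 0) ?_ hg
    rw [List.getD_eq_getElem _ 0 (by omega), List.getD_eq_getElem _ 0 hj]
    rcases Nat.eq_or_lt_of_le hij with he | hl
    · exact le_of_eq (by congr 1)
    · exact le_of_lt ((List.pairwise_iff_getElem.1 hpw) i j (by omega) hj hl)
  -- the common reference value
  have hRef : aFold ft k vals
      = if t = vals.length - 1 then -1
        else PySem.List.pyGetD (altRest ft (vals.getD t 0))
              (max (k - spentF ft (vals.getD t 0)) 0) 0 + 1 := by
    have h := aFold_drop ft k t vals hpw hsub hcov ht_le hfalse htrue 0 (by omega) hvne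
    simpa using h
  -- A's sweep reaches the reference value
  have hA : solution ft k = aFold ft k vals := by
    obtain ⟨v0, vrest, hvcons⟩ : ∃ v0 vr, vals = v0 :: vr := by
      cases hv : vals with
      | nil => exact absurd hv hvne
      | cons a b => exact ⟨a, b, rfl⟩
    have hall : ∀ x ∈ ft, v0 ≤ x := by
      intro x hx
      have hxv : x ∈ vals := hcov x hx
      rw [hvcons] at hxv
      rcases List.mem_cons.1 hxv with rfl | h
      · exact le_rfl
      · exact le_of_lt ((List.pairwise_cons.1 (hvcons ▸ hpw)).1 x h)
    unfold solution
    simp only [PySem.Dict.keys_counter]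
    rw [← hvals, hvcons]
    apply loopA ft k vrest v0 k (ft.length : Int) 0 (hvcons ▸ hpw)
      (fun y hy => hsub y (hvcons ▸ hy))
    · intro x hx hlt
      have hxv : x ∈ vals := hcov x hx
      rw [hvcons] at hxv
      rcases List.mem_cons.1 hxv with rfl | h
      · omega
      · exact h
    · rw [List.countP_eq_length.2 (fun x hx => by simpa using hall x hx)]
    · rw [spent_min ft v0 hall]
      ring
  -- B's binary search reaches the reference value
  have hB : solution_alt ft k
      = if t = vals.length - 1 then -1
        else PySem.List.pyGetD (altRest ft (vals.getD t 0))
              (max (k - spentF ft (vals.getD t 0)) 0) 0 + 1 := by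
    unfold solution_alt
    simp only [spentLeft_eq, ← hvals]
    have hb : bfirst (fun j => decide (k - spentF ft (PySem.List.pyGetD vals j 0)
          < cntGt ft (PySem.List.pyGetD vals j 0))) vals.length 0 ((vals.length : Int) - 1)
        = (t : Int) := by
      apply bfirst_eq _ vals.length 0 ((vals.length : Int) - 1) (t : Int) (by omega)
        (by positivity) (by omega)
      · intro i h0 hi
        have hit : i.toNat < t := by omega
        rw [show i = ((i.toNat : Nat) : Int) by omega, PySem.List.pyGetD_natCast]
        simp only [decide_eq_false_iff_not]
        exact hfalse i.toNat hit
      · intro i hti him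
        have hit : t ≤ i.toNat := by omega
        have him' : i.toNat < vals.length - 1 := by omega
        rw [show i = ((i.toNat : Nat) : Int) by omega, PySem.List.pyGetD_natCast]
        simp only [decide_eq_true_eq]
        exact hgoodmono t i.toNat hit (by omega) (htrue (by omega))
    rw [hb]
    by_cases hteq : t = vals.length - 1
    · rw [if_pos (by omega : (vals.length : Int) - 1 ≤ (t : Int)), if_pos hteq]
    · have htlt : t < vals.length - 1 := by omega
      rw [if_neg (by omega : ¬ (vals.length : Int) - 1 ≤ (t : Int)), if_neg hteq]
      rw [show ((t : Nat) : Int) = ((t : Nat) : Int) from rfl, PySem.List.pyGetD_natCast]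
      have hgood := htrue htlt
      have hcpos := cntGt_pos ft vals hpw hsub t (by omega)
      have hmax : (if k - spentF ft (vals.getD t 0) < 0 then 0
          else k - spentF ft (vals.getD t 0)) = max (k - spentF ft (vals.getD t 0)) 0 := by
        rcases le_or_gt 0 (k - spentF ft (vals.getD t 0)) with h | h
        · rw [if_neg (by omega), max_eq_left h]
        · rw [if_pos h, max_eq_right (le_of_lt h)]
      rw [hmax]
      have hlenalt : ((altRest ft (vals.getD t 0)).length : Int) = cntGt ft (vals.getD t 0) := by
        rw [length_altRest]
        rfl
      rw [pickScan_eq ft (vals.getD t 0) (max (k - spentF ft (vals.getD t 0)) 0)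
        (le_max_right _ _) ?_]
      rw [hlenalt]
      rcases le_total (k - spentF ft (vals.getD t 0)) 0 with h | h
      · rw [max_eq_right h]
        omega
      · rw [max_eq_left h]
        omega
  rw [hA, hRef, hB]
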